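-- pv_equiv track=rewrite | github.com/Sam-2727/String-Monte-Carlo | covariant formalism/python/compact_partition.py | _tree_path
-- ===== SOURCE A (Python) =====
-- from collections import deque
-- from typing import Dict, Sequence
--
-- def _tree_path(tree_adj: Dict[int, list], start: int, end: int):
--     """Return the unique tree path start -> end as (u, v, edge_idx) steps."""
--     prev = {start: (None, None)}
--     queue = deque([start])
--     while queue:
--         node = queue.popleft()
--         if node == end:
--             break
--         for nxt, edge_idx in tree_adj[node]:
--             if nxt in prev:
--                 continue
--             prev[nxt] = (node, edge_idx)
--             queue.append(nxt)
--
--     if end not in prev: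
--         raise ValueError(f"No tree path between vertices {start} and {end}")
--
--     steps = []
--     cur = end
--     while cur != start:
--         prv, edge_idx = prev[cur]
--         steps.append((prv, cur, edge_idx))
--         cur = prv
--     steps.reverse()
--     return steps
-- ===== SOURCE B (Python) =====
-- from collections import deque
--
-- def _tree_path(tree_adj, start, end):
--     """Return the unique tree path start -> end as (u, v, edge_idx) steps."""
--     seen = {start}
--     queue = deque([(start, [])])
--     while queue:
--         node, path = queue.popleft()
--         if node == end:
--             return path
--         for nxt, edge_idx in tree_adj[node]:
--             if nxt in seen:
--                 continue
--             seen.add(nxt)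
--             queue.append((nxt, path + [(node, nxt, edge_idx)]))
--     raise ValueError(f"No tree path between vertices {start} and {end}")
-- ===== Notes on version B (the rewrite author's own statement) =====
-- stated objective: alternative
-- what changed: The back-pointer dict (prev) and the separate append-and-reverse reconstruction loop are removed: B's BFS queue carries each node's full (u, v, edge_idx) path, so the answer is returned directly when the end vertex is popped.
import Mathlib
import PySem

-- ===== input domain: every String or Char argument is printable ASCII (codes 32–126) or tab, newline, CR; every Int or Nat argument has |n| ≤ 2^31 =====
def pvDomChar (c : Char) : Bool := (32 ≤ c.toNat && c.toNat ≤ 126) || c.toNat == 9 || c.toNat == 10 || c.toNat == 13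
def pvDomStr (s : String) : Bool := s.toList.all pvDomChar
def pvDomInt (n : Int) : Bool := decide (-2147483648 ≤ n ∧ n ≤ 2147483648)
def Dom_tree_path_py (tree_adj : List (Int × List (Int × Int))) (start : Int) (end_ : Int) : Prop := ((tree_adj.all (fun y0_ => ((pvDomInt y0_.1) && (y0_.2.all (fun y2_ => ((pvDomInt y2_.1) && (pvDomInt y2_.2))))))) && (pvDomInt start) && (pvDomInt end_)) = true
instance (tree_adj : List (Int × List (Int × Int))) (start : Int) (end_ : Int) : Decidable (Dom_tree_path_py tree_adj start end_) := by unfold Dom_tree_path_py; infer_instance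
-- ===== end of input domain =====

-- B replaces A's back-pointer dict + path reconstruction by a BFS whose queue carries each
-- node's path directly (objective: alternative decomposition, same BFS discovery order, no
-- speed claim); the equality lemma below in fact holds on ALL inputs of the ports.

-- shared totalization helper: both while-loops are ported with fuel; 2 + total number of
-- adjacency entries strictly exceeds the number of BFS iterations (each node is enqueued at
-- most once), so the fuel-exhausted branch is never taken on real inputs
def pvFuel (tree_adj : List (Int × List (Int × Int))) : Nat :=
  2 + tree_adj.foldl (fun a p => a + p.2.length) 0

-- tree_adj[node]; Python raises KeyError on a missing key — excluded by Pre_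
def pvAdj (tree_adj : List (Int × List (Int × Int))) (node : Int) : List (Int × Int) :=
  PySem.Dict.getD (PySem.Dict.mk tree_adj) node []

-- ===== PORT A =====
-- inner 'for nxt, edge_idx in tree_adj[node]': state = (prev, queue)
def stepA (node : Int)
    (st : PySem.Dict Int (Option Int × Option Int) × List Int) (p : Int × Int) :
    PySem.Dict Int (Option Int × Option Int) × List Int :=
  if st.1.contains p.1 then st
  else (st.1.insert p.1 (some node, some p.2), st.2 ++ [p.1])

-- 'while queue: node = queue.popleft(); if node == end: break; …'
def loopA (ta : List (Int × List (Int × Int))) (end_ : Int) :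
    Nat → PySem.Dict Int (Option Int × Option Int) → List Int →
    Option (PySem.Dict Int (Option Int × Option Int))
  | _, prev, [] => some prev
  | 0, _, _ :: _ => none
  | f + 1, prev, node :: rest =>
    if node = end_ then some prev
    else
      let st := (pvAdj ta node).foldl (stepA node) (prev, rest)
      loopA ta end_ f st.1 st.2

-- 'steps = []; cur = end; while cur != start: …; steps.reverse()'
def reconA (prev : PySem.Dict Int (Option Int × Option Int)) (start : Int) :
    Nat → Int → List (Int × Int × Int) → List (Int × Int × Int)
  | 0, _, acc => acc.reverse
  | f + 1, cur, acc =>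
    if cur = start then acc.reverse
    else
      match prev.get? cur with
      | some (some prv, some ei) => reconA prev start f prv (acc ++ [(prv, cur, ei)])
      | _ => acc.reverse

def tree_path_py (tree_adj : List (Int × List (Int × Int))) (start : Int) (end_ : Int) : List (Int × Int × Int) :=
  match loopA tree_adj end_ (pvFuel tree_adj)
      (PySem.Dict.empty.insert start ((none : Option Int), (none : Option Int))) [start] with
  | none => []    -- fuel exhausted (unreachable on real runs)
  | some prev =>
    if prev.contains end_ then reconA prev start prev.size end_ []
    else []       -- Python raises ValueError here — excluded by Pre_

-- ===== PORT B =====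
-- inner for-loop: state = (seen, queue); each queue entry carries its whole path
def stepB (node : Int) (path : List (Int × Int × Int))
    (st : PySem.Set Int × List (Int × List (Int × Int × Int))) (p : Int × Int) :
    PySem.Set Int × List (Int × List (Int × Int × Int)) :=
  if PySem.Set.contains st.1 p.1 then st
  else (PySem.Set.add st.1 p.1, st.2 ++ [(p.1, path ++ [(node, p.1, p.2)])])

-- 'while queue: node, path = queue.popleft(); if node == end: return path; …'
def loopB (ta : List (Int × List (Int × Int))) (end_ : Int) :
    Nat → PySem.Set Int → List (Int × List (Int × Int × Int)) →
    Option (List (Int × Int × Int))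
  | _, _, [] => none        -- Python raises ValueError here — excluded by Pre_
  | 0, _, _ :: _ => none    -- fuel exhausted (unreachable on real runs)
  | f + 1, seen, (node, path) :: rest =>
    if node = end_ then some path
    else
      let st := (pvAdj ta node).foldl (stepB node path) (seen, rest)
      loopB ta end_ f st.1 st.2

def tree_path_py_alt (tree_adj : List (Int × List (Int × Int))) (start : Int) (end_ : Int) : List (Int × Int × Int) :=
  (loopB tree_adj end_ (pvFuel tree_adj) (PySem.Set.ofList [start]) [(start, [])]).getD []

-- ===== PRECONDITION & SPEC =====
-- Pre_ support: one BFS level step.  Folding pvStepSet over a frontier produces the next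
-- level's frontier in exactly Python's enqueue order (adjacency order, first discovery wins).
def pvStepSet (ta : List (Int × List (Int × Int)))
    (st : PySem.Set Int × List Int) (n : Int) : PySem.Set Int × List Int :=
  (pvAdj ta n).foldl
    (fun st q => if PySem.Set.contains st.1 q.1 then st
                 else (PySem.Set.add st.1 q.1, st.2 ++ [q.1])) st

-- level-by-level check of where A's BFS returns: once end_'s level is reached, only the
-- vertices dequeued BEFORE end_ (the frontier prefix) must be dict keys; before that level,
-- every frontier vertex is dequeued and expanded, so all must be keys; if end_ is never
-- discovered the loop drains and A raises ValueError (fuel ta.length+2 exceeds the number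
-- of levels, since each pre-end level consists of distinct dict keys)
def pvPreAux (ta : List (Int × List (Int × Int))) (end_ : Int) (K : List Int) :
    Nat → PySem.Set Int → List Int → Bool
  | 0, _, _ => false
  | f + 1, visited, frontier =>
    if frontier.contains end_ then
      (frontier.takeWhile (fun m => !(m == end_))).all (fun m => K.contains m)
    else
      frontier.all (fun m => K.contains m) &&
        (let st := frontier.foldl (pvStepSet ta) (visited, ([] : List Int));
         pvPreAux ta end_ K f st.1 st.2)

-- Pre_ excludes exactly the inputs on which A raises — KeyError when a vertex missing from
-- the dict is dequeued before end_ is, ValueError when end_ is never discovered — plus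
-- association lists with duplicate keys, on which the dict convention (first-match lookup)
-- cannot match a real Python dict (later duplicates overwrite earlier ones).
def Pre_tree_path_py (tree_adj : List (Int × List (Int × Int))) (start : Int) (end_ : Int) : Prop :=
  start = end_ ∨
    ((tree_adj.map Prod.fst).Nodup ∧
     pvPreAux tree_adj end_ (tree_adj.map Prod.fst) (tree_adj.length + 2)
       (PySem.Set.ofList [start]) [start] = true)
instance (tree_adj : List (Int × List (Int × Int))) (start : Int) (end_ : Int) : Decidable (Pre_tree_path_py tree_adj start end_) := by unfold Pre_tree_path_py; infer_instance

def pvWitness_tree_path_py : (List (Int × List (Int × Int))) × Int × Int :=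
  ([(0, [(1, 5)]), (1, [(0, 5)])], 0, 1)

def Spec_tree_path_py (tree_adj : List (Int × List (Int × Int))) (start : Int) (end_ : Int) (out : List (Int × Int × Int)) : Prop := out = tree_path_py_alt tree_adj start end_
instance (tree_adj : List (Int × List (Int × Int))) (start : Int) (end_ : Int) (out : List (Int × Int × Int)) : Decidable (Spec_tree_path_py tree_adj start end_ out) := by unfold Spec_tree_path_py; infer_instance

-- ===== CLAIM (what is proved, stated in full; the proofs are below) =====
def Claim_equal_tree_path_py : Prop := ∀ (tree_adj : List (Int × List (Int × Int))) (start : Int) (end_ : Int), Dom_tree_path_py tree_adj start end_ → Pre_tree_path_py tree_adj start end_ → Spec_tree_path_py tree_adj start end_ (tree_path_py tree_adj start end_)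

-- ===== LEMMAS AND PROOFS =====

-- p is A's back-pointer chain from n down to start, written last-step-first
def ChainRev (prev : PySem.Dict Int (Option Int × Option Int)) (start : Int) :
    Int → List (Int × Int × Int) → Prop
  | n, [] => n = start
  | n, s :: rest =>
      s.2.1 = n ∧ n ≠ start ∧ prev.get? n = some (some s.1, some s.2.2) ∧
      ChainRev prev start s.1 rest

-- joint invariant of the two BFS loops: membership in B's seen set mirrors A's prev keys,
-- end_ can only be a prev key while still queued, and every queued path is prev's chain
def SimInv (start end_ : Int) (prev : PySem.Dict Int (Option Int × Option Int))
    (seen : PySem.Set Int) (qB : List (Int × List (Int × Int × Int))) : Prop :=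
  (∀ x : Int, PySem.Set.contains seen x = prev.contains x) ∧
  prev.contains start = true ∧
  (prev.contains end_ = true → end_ ∈ qB.map Prod.fst) ∧
  (∀ e ∈ qB, ChainRev prev start e.1 e.2.reverse ∧ e.2.length + 1 ≤ prev.size)

lemma set_contains_add (s : PySem.Set Int) (x y : Int) :
    PySem.Set.contains (PySem.Set.add s x) y = (y == x || PySem.Set.contains s y) := by
  rw [Bool.eq_iff_iff]
  simp only [Bool.or_eq_true, beq_iff_eq, PySem.Set.contains_iff, PySem.Set.mem_add]
  tauto

lemma chainRev_insert (prev : PySem.Dict Int (Option Int × Option Int)) (start k : Int)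
    (v : Option Int × Option Int) :
    ∀ (n : Int) (l : List (Int × Int × Int)), ChainRev prev start n l →
      prev.contains k = false → ChainRev (prev.insert k v) start n l := by
  intro n l
  induction l generalizing n with
  | nil => intro h _; exact h
  | cons s rest ih =>
    intro h hk
    obtain ⟨h1, h2, h3, h4⟩ := h
    have hne : n ≠ k := by
      intro he; subst he
      rw [(PySem.Dict.get?_eq_none_iff_contains prev n).mpr hk] at h3
      simp at h3
    exact ⟨h1, h2, by rw [PySem.Dict.get?_insert_of_ne _ v hne]; exact h3, ih _ h4 hk⟩

-- A's reconstruction loop replays a chain exactly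
lemma recon_chain (start : Int) :
    ∀ (l : List (Int × Int × Int)) (prev : PySem.Dict Int (Option Int × Option Int))
      (n : Int) (f : Nat) (acc : List (Int × Int × Int)),
      ChainRev prev start n l → l.length ≤ f →
      reconA prev start f n acc = (acc ++ l).reverse := by
  intro l
  induction l with
  | nil =>
    intro prev n f acc h _
    have hn : n = start := h
    subst hn
    cases f <;> simp [reconA]
  | cons s rest ih =>
    intro prev n f acc h hf
    obtain ⟨u, v, e⟩ := s
    obtain ⟨h1, h2, h3, h4⟩ := h
    simp only at h1
    subst h1
    cases f with
    | zero => simp at hf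
    | succ f' =>
      simp only [reconA, if_neg h2, h3]
      rw [ih prev u f' (acc ++ [(u, v, e)]) h4 (by simpa using hf)]
      simp

-- one popped node's for-loop keeps the two BFS states in lock-step
lemma fold_sim (start end_ node : Int)
    (path : List (Int × Int × Int)) :
    ∀ (adj : List (Int × Int)) (prev : PySem.Dict Int (Option Int × Option Int))
      (seen : PySem.Set Int) (qB : List (Int × List (Int × Int × Int))),
      SimInv start end_ prev seen qB →
      ChainRev prev start node path.reverse →
      path.length + 1 ≤ prev.size →
      (adj.foldl (stepA node) (prev, qB.map Prod.fst)).2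
          = (adj.foldl (stepB node path) (seen, qB)).2.map Prod.fst ∧
      SimInv start end_ (adj.foldl (stepA node) (prev, qB.map Prod.fst)).1
          (adj.foldl (stepB node path) (seen, qB)).1
          (adj.foldl (stepB node path) (seen, qB)).2 ∧
      ChainRev (adj.foldl (stepA node) (prev, qB.map Prod.fst)).1 start node path.reverse ∧
      path.length + 1 ≤ (adj.foldl (stepA node) (prev, qB.map Prod.fst)).1.size := by
  intro adj
  induction adj with
  | nil => intro prev seen qB hinv hch hlen; exact ⟨rfl, hinv, hch, hlen⟩
  | cons p adj' ih =>
    intro prev seen qB hinv hch hlen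
    obtain ⟨hsync, hstart, hendq, hq⟩ := hinv
    simp only [List.foldl_cons]
    by_cases hc : prev.contains p.1 = true
    · have hA : stepA node (prev, qB.map Prod.fst) p = (prev, qB.map Prod.fst) := by
        simp [stepA, hc]
      have hcB : PySem.Set.contains seen p.1 = true := by rw [hsync p.1]; exact hc
      have hB : stepB node path (seen, qB) p = (seen, qB) := by
        unfold stepB; rw [if_pos hcB]
      rw [hA, hB]
      exact ih prev seen qB ⟨hsync, hstart, hendq, hq⟩ hch hlen
    · have hc' : prev.contains p.1 = false := by
        cases h : prev.contains p.1
        · rfl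
        · exact absurd h hc
      have hA : stepA node (prev, qB.map Prod.fst) p
          = (prev.insert p.1 (some node, some p.2), qB.map Prod.fst ++ [p.1]) := by
        simp [stepA, hc']
      have hcB : PySem.Set.contains seen p.1 = false := by rw [hsync p.1]; exact hc'
      have hB : stepB node path (seen, qB) p
          = (PySem.Set.add seen p.1, qB ++ [(p.1, path ++ [(node, p.1, p.2)])]) := by
        unfold stepB; rw [if_neg (by rw [hcB]; exact Bool.false_ne_true)]
      rw [hA, hB]
      have hmap : (qB ++ [(p.1, path ++ [(node, p.1, p.2)])]).map Prod.fst
          = qB.map Prod.fst ++ [p.1] := by simp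
      rw [← hmap]
      have hsize : (prev.insert p.1 (some node, some p.2)).size = prev.size + 1 := by
        rw [PySem.Dict.size_insert, if_neg (by simp [hc'])]
      have hne_start : p.1 ≠ start := by
        intro he; rw [he, hstart] at hc'; exact Bool.noConfusion hc'
      refine ih _ _ _ ⟨?_, ?_, ?_, ?_⟩ ?_ ?_
      · intro x
        rw [set_contains_add, hsync x, PySem.Dict.contains_insert]
      · rw [PySem.Dict.contains_insert]
        simp [hstart]
      · intro hce
        rw [PySem.Dict.contains_insert] at hce
        rcases Bool.or_eq_true_iff.mp hce with he | he
        · have : end_ = p.1 := by simpa using he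
          simp [this]
        · have := hendq he
          simp only [List.map_append, List.map_cons]
          exact List.mem_append_left _ this
      · intro e he
        rcases List.mem_append.mp he with hmem | hmem
        · obtain ⟨hche, hlene⟩ := hq e hmem
          exact ⟨chainRev_insert prev start p.1 _ _ _ hche hc', by omega⟩
        · have heq : e = (p.1, path ++ [(node, p.1, p.2)]) := by simpa using hmem
          subst heq
          constructor
          · show ChainRev _ start p.1 ((path ++ [(node, p.1, p.2)]).reverse)
            have hrev : (path ++ [(node, p.1, p.2)]).reverse
                = (node, p.1, p.2) :: path.reverse := by simp
            rw [hrev]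
            refine ⟨rfl, hne_start, ?_, ?_⟩
            · exact PySem.Dict.get?_insert_self prev p.1 (some node, some p.2)
            · exact chainRev_insert prev start p.1 _ _ _ hch hc'
          · simp only
            rw [hsize]
            simpa using Nat.add_le_add_right hlen 1
      · exact chainRev_insert prev start p.1 _ _ _ hch hc'
      · omega

-- the two loops agree step for step
lemma loop_sim (ta : List (Int × List (Int × Int))) (start end_ : Int) :
    ∀ (f : Nat) (prev : PySem.Dict Int (Option Int × Option Int))
      (seen : PySem.Set Int) (qB : List (Int × List (Int × Int × Int))),
      SimInv start end_ prev seen qB →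
      (match loopA ta end_ f prev (qB.map Prod.fst) with
       | none => []
       | some pf => if pf.contains end_ then reconA pf start pf.size end_ [] else [])
      = (loopB ta end_ f seen qB).getD [] := by
  intro f
  induction f with
  | zero =>
    intro prev seen qB hinv
    obtain ⟨_, _, hendq, _⟩ := hinv
    cases qB with
    | nil =>
      have hce : prev.contains end_ = false := by
        cases h : prev.contains end_
        · rfl
        · exact absurd (hendq h) (by simp)
      simp [loopA, loopB, hce]
    | cons hd tl =>
      obtain ⟨node, path⟩ := hd
      simp [loopA, loopB]
  | succ f' ih =>
    intro prev seen qB hinv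
    obtain ⟨hsync, hstart, hendq, hq⟩ := hinv
    cases qB with
    | nil =>
      have hce : prev.contains end_ = false := by
        cases h : prev.contains end_
        · rfl
        · exact absurd (hendq h) (by simp)
      simp [loopA, loopB, hce]
    | cons hd tl =>
      obtain ⟨node, path⟩ := hd
      obtain ⟨hch, hlen⟩ := hq (node, path) (by simp)
      by_cases hend : node = end_
      · subst hend
        have hcont : prev.contains node = true := by
          cases hpr : path.reverse with
          | nil =>
            rw [hpr] at hch
            have hns : node = start := hch
            rw [hns]; exact hstart
          | cons s r =>
            rw [hpr] at hch
            obtain ⟨_, _, hget, _⟩ := hch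
            cases hc2 : prev.contains node
            · rw [(PySem.Dict.get?_eq_none_iff_contains prev node).mpr hc2] at hget
              simp at hget
            · rfl
        have hA : loopA ta node (f' + 1) prev (node :: List.map Prod.fst tl)
            = some prev := by simp [loopA]
        have hB : loopB ta node (f' + 1) seen ((node, path) :: tl)
            = some path := by simp [loopB]
        have hrec : reconA prev start prev.size node [] = path := by
          rw [recon_chain start path.reverse prev node prev.size [] hch
            (by simpa using Nat.le_of_succ_le hlen)]
          simp
        simp only [List.map_cons]
        rw [hA, hB]
        simp [hcont, hrec]
      · simp only [List.map_cons, loopA, loopB, if_neg hend]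
        have hinv' : SimInv start end_ prev seen tl := by
          refine ⟨hsync, hstart, ?_, fun e he => hq e (List.mem_cons_of_mem _ he)⟩
          intro hce
          have := hendq hce
          simp only [List.map_cons, List.mem_cons] at this
          rcases this with h | h
          · exact absurd h.symm hend
          · exact h
        obtain ⟨hq2, hinv2, _, _⟩ :=
          fold_sim start end_ node path (pvAdj ta node) prev seen tl hinv' hch hlen
        rw [hq2]
        exact ih _ _ _ hinv2

lemma tree_path_univ (ta : List (Int × List (Int × Int))) (start end_ : Int) :
    tree_path_py ta start end_ = tree_path_py_alt ta start end_ := by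
  have hsync : ∀ x : Int, PySem.Set.contains (PySem.Set.ofList [start]) x
      = (PySem.Dict.empty.insert start
          ((none : Option Int), (none : Option Int))).contains x := by
    intro x
    have h1 : PySem.Set.ofList [start] = PySem.Set.add PySem.Set.empty start := rfl
    rw [h1, set_contains_add, PySem.Dict.contains_insert]
    simp [PySem.Set.contains, PySem.Set.empty]
  have hinv : SimInv start end_
      (PySem.Dict.empty.insert start ((none : Option Int), (none : Option Int)))
      (PySem.Set.ofList [start]) [(start, [])] := by
    refine ⟨hsync, ?_, ?_, ?_⟩
    · rw [PySem.Dict.contains_insert]; simp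
    · intro hce
      rw [PySem.Dict.contains_insert] at hce
      have : end_ = start := by simpa using hce
      simp [this]
    · intro e he
      have heq : e = (start, ([] : List (Int × Int × Int))) := by simpa using he
      subst heq
      refine ⟨rfl, ?_⟩
      rw [PySem.Dict.size_insert]
      simp
  have h := loop_sim ta start end_ (pvFuel ta)
    (PySem.Dict.empty.insert start ((none : Option Int), (none : Option Int)))
    (PySem.Set.ofList [start]) [(start, [])] hinv
  simp only [List.map_cons, List.map_nil] at h
  unfold tree_path_py tree_path_py_alt
  exact h

-- ===== VERDICT (by name: the statement is the Claim_ definition above) =====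
theorem tree_path_py_spec : Claim_equal_tree_path_py := by
  intro ta start end_ _ _
  unfold Spec_tree_path_py
  exact tree_path_univ ta start end_
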